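-- pv_equiv track=rewrite | github.com/mmmudmi/Introduction-to-Computer-Programming | Assignment 5/sgroup.py | index_of_largest_gap
-- ===== SOURCE A (Python) =====
-- def index_of_largest_gap(data: list[int]):
--     index = dict()
--     i = 0
--     while i < len(data)-1:
--         index[i] = abs(data[i]-data[i+1])
--         i += 1
--     for x,y in index.items():
--         if y == max(index.values()):
--             largest = x
--     return largest
-- ===== SOURCE B (Python) =====
-- def index_of_largest_gap(data: list[int]):
--     # single pass over adjacent pairs; >= keeps the LAST index of the maximal gap
--     best = -1
--     best_i = 0
--     i = 0
--     for a, b in zip(data, data[1:]):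
--         g = abs(a - b)
--         if g >= best:
--             best = g
--             best_i = i
--         i += 1
--     return best_i
-- ===== Notes on version B (the rewrite author's own statement) =====
-- stated objective: faster
-- what changed: A builds a dict of all adjacent gaps and recomputes max(values) inside the scan over its items (quadratic); B is a single pass over adjacent pairs tracking the running max gap, updating the index on >= to keep the last occurrence; Pre_ excludes lists of fewer than 2 elements, on which A raises UnboundLocalError.
import Mathlib
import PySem

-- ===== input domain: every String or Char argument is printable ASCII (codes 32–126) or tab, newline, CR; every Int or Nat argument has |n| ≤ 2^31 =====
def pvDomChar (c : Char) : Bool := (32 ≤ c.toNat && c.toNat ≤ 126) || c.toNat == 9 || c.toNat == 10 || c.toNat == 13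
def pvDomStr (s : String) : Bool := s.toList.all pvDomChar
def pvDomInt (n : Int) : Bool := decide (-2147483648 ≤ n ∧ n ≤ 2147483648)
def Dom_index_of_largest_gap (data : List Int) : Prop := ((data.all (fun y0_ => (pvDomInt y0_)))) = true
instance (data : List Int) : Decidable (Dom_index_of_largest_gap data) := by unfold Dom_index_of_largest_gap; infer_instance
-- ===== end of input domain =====

-- B replaces A's dict-of-gaps plus per-item max(values) rescans by a single pass tracking
-- the running maximal gap (updating the index on >= to keep the last occurrence).

-- ===== PORT A =====
-- while i < len(data)-1: index[i] = abs(data[i]-data[i+1]); i += 1   (a counted loop, i = 0,1,…)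
-- then: for x,y in index.items(): if y == max(index.values()): largest = x; return largest
def index_of_largest_gap (data : List Int) : Int :=
  let idx : PySem.Dict Int Int :=
    (PySem.List.pyRange 0 ((data.length : Int) - 1) 1).foldl
      (fun d i => d.insert i |PySem.List.pyGetD data i 0 - PySem.List.pyGetD data (i + 1) 0|)
      PySem.Dict.empty
  let largest : Option Int :=
    idx.items.foldl
      (fun acc p => if PySem.List.max? idx.values (fun v => v) = some p.2 then some p.1 else acc)
      none
  -- Python raises NameError when 'largest' was never assigned (len(data) < 2): outside Pre_
  largest.getD 0

-- ===== PORT B =====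
-- best = -1; best_i = 0; i = 0; for a,b in zip(data, data[1:]): g = abs(a-b); if g >= best: best, best_i = g, i; i += 1
def index_of_largest_gap_alt (data : List Int) : Int :=
  ((data.zip (PySem.List.slice data (some 1) none)).foldl
      (fun (s : Int × Int × Int) (ab : Int × Int) =>
        let g : Int := |ab.1 - ab.2|
        if g ≥ s.1 then (g, s.2.2, s.2.2 + 1) else (s.1, s.2.1, s.2.2 + 1))
      (-1, 0, 0)).2.1

-- ===== PRECONDITION & SPEC =====
-- A raises NameError ('largest' never assigned) when len(data) < 2; those inputs are excluded.
def Pre_index_of_largest_gap (data : List Int) : Prop := 2 ≤ data.length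
instance (data : List Int) : Decidable (Pre_index_of_largest_gap data) := by
  unfold Pre_index_of_largest_gap; infer_instance

def pvWitness_index_of_largest_gap : List Int := [4, -1, 7]

def Spec_index_of_largest_gap (data : List Int) (out : Int) : Prop := out = index_of_largest_gap_alt data
instance (data : List Int) (out : Int) : Decidable (Spec_index_of_largest_gap data out) := by unfold Spec_index_of_largest_gap; infer_instance

-- ===== CLAIM (what is proved, stated in full; the proofs are below) =====
def Claim_equal_index_of_largest_gap : Prop := ∀ (data : List Int), Dom_index_of_largest_gap data → Pre_index_of_largest_gap data → Spec_index_of_largest_gap data (index_of_largest_gap data)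

-- ===== LEMMAS AND PROOFS =====

-- the list of adjacent absolute gaps
def pvGaps (data : List Int) : List Int :=
  (data.zip data.tail).map (fun p => |p.1 - p.2|)

-- last index (from the left) at which M occurs
def pvLastIdx (M : Int) : List Int → Option Int
  | [] => none
  | x :: t =>
    match pvLastIdx M t with
    | some j => some (j + 1)
    | none => if M = x then some 0 else none

-- (max value, index of its last occurrence), computed from the right
def pvRef : List Int → Option (Int × Int)
  | [] => none
  | x :: t =>
    match pvRef t with
    | none => some (x, 0)
    | some (m, j) => if x > m then some (x, 0) else some (m, j + 1)

lemma pvEnum_getElem {α : Type} (xs : List α) (s : Int) (k : Nat) (h : k < xs.length)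
    (h' : k < (PySem.List.enumerate xs s).length) :
    (PySem.List.enumerate xs s)[k] = (s + k, xs[k]) := by
  induction xs generalizing s k with
  | nil => simp at h
  | cons x t ih =>
    cases k with
    | zero => simp [PySem.List.enumerate_cons]
    | succ k =>
      have hk : k < t.length := by simpa using h
      simp [PySem.List.enumerate_cons, ih (s + 1) k hk]
      ring

-- A's dict items list is the enumeration of the gap list
lemma pvItems_eq (data : List Int) :
    (PySem.List.pyRange 0 ((data.length : Int) - 1) 1).map
      (fun i => (i, |PySem.List.pyGetD data i 0 - PySem.List.pyGetD data (i + 1) 0|))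
      = PySem.List.enumerate (pvGaps data) 0 := by
  apply List.ext_getElem
  · simp [pvGaps, PySem.List.length_pyRange_one, PySem.List.length_enumerate]
  · intro k hk1 hk2
    have hlen : k < ((data.length : Int) - 1 - 0).toNat := by
      simpa [PySem.List.length_pyRange_one] using hk1
    have hk' : k + 1 < data.length := by omega
    have hkd : k < data.length := by omega
    have hkg : k < (pvGaps data).length := by
      simp [pvGaps]; omega
    rw [List.getElem_map, PySem.List.getElem_pyRange_one, pvEnum_getElem _ _ _ hkg hk2]
    have h1 : PySem.List.pyGetD data ((0 : Int) + (k : Int)) 0 = data[k] := by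
      rw [zero_add, PySem.List.pyGetD_natCast, List.getD_eq_getElem _ _ hkd]
    have h2 : PySem.List.pyGetD data ((0 : Int) + (k : Int) + 1) 0 = data[k + 1] := by
      have : (0 : Int) + (k : Int) + 1 = ((k + 1 : Nat) : Int) := by push_cast; ring
      rw [this, PySem.List.pyGetD_natCast, List.getD_eq_getElem _ _ hk']
    have hzip : k < (data.zip data.tail).length := by
      simpa [pvGaps] using hkg
    have h3 : (pvGaps data)[k] = |data[k] - data[k + 1]| := by
      simp only [pvGaps, List.getElem_map, List.getElem_zip]
      rw [List.getElem_tail]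
    rw [h1, h2, h3]

-- A's items fold finds the last index at which M occurs
lemma pvAfold_char (M : Int) (g : List Int) (k : Int) (acc : Option Int) :
    (PySem.List.enumerate g k).foldl (fun acc p => if M = p.2 then some p.1 else acc) acc
      = match pvLastIdx M g with
        | some j => some (k + j)
        | none => acc := by
  induction g generalizing k acc with
  | nil => simp [pvLastIdx]
  | cons x t ih =>
    rw [PySem.List.enumerate_cons]
    simp only [List.foldl_cons, ih]
    cases h : pvLastIdx M t with
    | some j => simp [pvLastIdx, h]; ring
    | none =>
      by_cases hx : M = x
      · subst hx; simp [pvLastIdx, h]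
      · simp [pvLastIdx, h, hx]

lemma pvRef_ne_none (x : Int) (t : List Int) : pvRef (x :: t) ≠ none := by
  simp only [pvRef]
  cases pvRef t with
  | none => simp
  | some p =>
    obtain ⟨m, j⟩ := p
    by_cases hx : x > m <;> simp [hx]

-- B's fold computes (max, last argmax index, final counter)
lemma pvBfold_char (g : List Int) (best besti i : Int) :
    g.foldl
      (fun (s : Int × Int × Int) gg =>
        if gg ≥ s.1 then (gg, s.2.2, s.2.2 + 1) else (s.1, s.2.1, s.2.2 + 1))
      (best, besti, i)
      = match pvRef g with
        | none => (best, besti, i)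
        | some (m, j) => if m ≥ best then (m, i + j, i + g.length) else (best, besti, i + g.length) := by
  induction g generalizing best besti i with
  | nil => simp [pvRef]
  | cons x t ih =>
    rw [List.foldl_cons]
    show List.foldl _ (if x ≥ best then ((x : Int), i, i + 1) else (best, besti, i + 1)) t = _
    by_cases hx : x ≥ best
    · rw [if_pos hx, ih]
      cases h : pvRef t with
      | none =>
        have ht : t = [] := by
          cases t with
          | nil => rfl
          | cons a b => exact absurd h (pvRef_ne_none a b)
        subst ht
        simp [pvRef, hx]
      | some mj =>
        obtain ⟨m, j⟩ := mj
        simp only [pvRef, h]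
        by_cases hxm : x > m
        · have hmx : ¬ (m ≥ x) := by omega
          simp only [if_pos hxm, if_pos hx, if_neg hmx]
          simp [Prod.ext_iff]
          ring
        · have hmx : m ≥ x := by omega
          have hmb : m ≥ best := by omega
          simp only [if_neg hxm, if_pos hmx, if_pos hmb]
          simp [Prod.ext_iff]
          constructor <;> ring
    · rw [if_neg hx, ih]
      cases h : pvRef t with
      | none =>
        have ht : t = [] := by
          cases t with
          | nil => rfl
          | cons a b => exact absurd h (pvRef_ne_none a b)
        subst ht
        simp [pvRef, hx]
      | some mj =>
        obtain ⟨m, j⟩ := mj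
        simp only [pvRef, h]
        by_cases hxm : x > m
        · have hxb : ¬ (x ≥ best) := hx
          have hmb : ¬ (m ≥ best) := by omega
          simp only [if_pos hxm, if_neg hxb, if_neg hmb]
          simp [Prod.ext_iff]
          ring
        · simp only [if_neg hxm]
          by_cases hmb : m ≥ best
          · simp only [if_pos hmb]
            simp [Prod.ext_iff]
            constructor <;> ring
          · simp only [if_neg hmb]
            simp [Prod.ext_iff]
            ring

lemma pvLastIdx_mem {M : Int} {g : List Int} {j : Int} (h : pvLastIdx M g = some j) : M ∈ g := by
  induction g generalizing j with
  | nil => simp [pvLastIdx] at h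
  | cons x t ih =>
    simp only [pvLastIdx] at h
    cases ht : pvLastIdx M t with
    | some j' => exact List.mem_cons_of_mem _ (ih ht)
    | none =>
      rw [ht] at h
      by_cases hx : M = x
      · simp [hx]
      · simp [hx] at h

-- pvRef returns the max value, its membership, and the last index where it occurs
lemma pvRef_spec {g : List Int} {m j : Int} (h : pvRef g = some (m, j)) :
    (∀ y ∈ g, y ≤ m) ∧ m ∈ g ∧ pvLastIdx m g = some j := by
  induction g generalizing m j with
  | nil => simp [pvRef] at h
  | cons x t ih =>
    simp only [pvRef] at h
    cases ht : pvRef t with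
    | none =>
      rw [ht] at h
      have ht' : t = [] := by
        cases t with
        | nil => rfl
        | cons a b => exact absurd ht (pvRef_ne_none a b)
      subst ht'
      obtain ⟨hm, hj⟩ : x = m ∧ (0 : Int) = j := by simpa using h
      subst hm; subst hj
      refine ⟨by simp, by simp, by simp [pvLastIdx]⟩
    | some mj =>
      obtain ⟨m', j'⟩ := mj
      rw [ht] at h
      dsimp only at h
      obtain ⟨hb, hmem, hlast⟩ := ih ht
      by_cases hxm : x > m'
      · rw [if_pos hxm] at h
        obtain ⟨hm, hj⟩ : x = m ∧ (0 : Int) = j := by simpa using h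
        subst hm; subst hj
        have hnotmem : x ∉ t := fun hin => absurd (hb x hin) (by omega)
        have hnone : pvLastIdx x t = none := by
          cases hl : pvLastIdx x t with
          | none => rfl
          | some jj => exact absurd (pvLastIdx_mem hl) hnotmem
        refine ⟨?_, by simp, by simp [pvLastIdx, hnone]⟩
        intro y hy
        rcases List.mem_cons.mp hy with h1 | h2
        · omega
        · have := hb y h2; omega
      · rw [if_neg hxm] at h
        obtain ⟨hm, hj⟩ : m' = m ∧ j' + 1 = j := by simpa using h
        subst hm; subst hj
        refine ⟨?_, List.mem_cons_of_mem _ hmem, by simp [pvLastIdx, hlast]⟩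
        intro y hy
        rcases List.mem_cons.mp hy with h1 | h2
        · omega
        · exact hb y h2

lemma pvValues_eq (data : List Int) :
    (((PySem.List.pyRange 0 ((data.length : Int) - 1) 1).foldl
        (fun d i => d.insert i |PySem.List.pyGetD data i 0 - PySem.List.pyGetD data (i + 1) 0|)
        PySem.Dict.empty) : PySem.Dict Int Int).items
      = PySem.List.enumerate (pvGaps data) 0 := by
  have h := PySem.Dict.items_foldl_insert_fresh
      (PySem.List.pyRange 0 ((data.length : Int) - 1) 1)
      (fun i => i)
      (fun i => |PySem.List.pyGetD data i 0 - PySem.List.pyGetD data (i + 1) 0|)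
      PySem.Dict.empty
      (by intro a _; exact PySem.Dict.contains_empty a)
      (by simpa [List.map_id'] using PySem.List.nodup_pyRange_one 0 ((data.length : Int) - 1))
  exact h.trans (by simpa using pvItems_eq data)

-- ===== VERDICT (by name: the statement is the Claim_ definition above) =====
theorem index_of_largest_gap_spec : Claim_equal_index_of_largest_gap := by
  unfold Claim_equal_index_of_largest_gap
  intro data _ hpre
  unfold Pre_index_of_largest_gap at hpre
  unfold Spec_index_of_largest_gap index_of_largest_gap index_of_largest_gap_alt
  simp only []
  have hitems := pvValues_eq data
  -- the gap list is nonempty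
  have hglen : (pvGaps data).length = data.length - 1 := by
    simp [pvGaps]
  have hgne : pvGaps data ≠ [] := by
    intro hnil
    rw [hnil] at hglen
    simp at hglen
    omega
  obtain ⟨x, t, hgxt⟩ := List.exists_cons_of_ne_nil hgne
  cases href : pvRef (pvGaps data) with
  | none => rw [hgxt] at href; exact absurd href (pvRef_ne_none x t)
  | some mj =>
    obtain ⟨m, j⟩ := mj
    obtain ⟨hb, hmem, hlast⟩ := pvRef_spec href
    have hm0 : 0 ≤ m := by
      have hmem' := hmem
      simp only [pvGaps] at hmem'
      rcases List.mem_map.mp hmem' with ⟨p, _, hpe⟩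
      rw [← hpe]; exact abs_nonneg _
    have hvals :
        (((PySem.List.pyRange 0 ((data.length : Int) - 1) 1).foldl
            (fun d i => d.insert i |PySem.List.pyGetD data i 0 - PySem.List.pyGetD data (i + 1) 0|)
            PySem.Dict.empty) : PySem.Dict Int Int).values = pvGaps data := by
      show (((PySem.List.pyRange 0 ((data.length : Int) - 1) 1).foldl
            (fun d i => d.insert i |PySem.List.pyGetD data i 0 - PySem.List.pyGetD data (i + 1) 0|)
            PySem.Dict.empty) : PySem.Dict Int Int).items.map (·.2) = pvGaps data
      rw [hitems]
      exact PySem.List.map_snd_enumerate _ _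
    have hmax :
        PySem.List.max?
          ((((PySem.List.pyRange 0 ((data.length : Int) - 1) 1).foldl
              (fun d i => d.insert i |PySem.List.pyGetD data i 0 - PySem.List.pyGetD data (i + 1) 0|)
              PySem.Dict.empty) : PySem.Dict Int Int).values) (fun v => v) = some m := by
      rw [hvals]
      cases hmx : PySem.List.max? (pvGaps data) (fun v => v) with
      | none => exact absurd ((PySem.List.max?_eq_none_iff _ _).mp hmx) hgne
      | some M =>
        have hMmem := PySem.List.max?_mem hmx
        have hMmax := PySem.List.max?_isMax hmx
        rw [le_antisymm (hb M hMmem) (hMmax m hmem)]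
    simp only [hmax, Option.some.injEq]
    rw [hitems, pvAfold_char m (pvGaps data) 0 none, hlast]
    -- B side: fold over the zipped pairs is the fold over the gap list
    rw [PySem.List.slice_from_one]
    have hB : (data.zip data.tail).foldl
        (fun (s : Int × Int × Int) (ab : Int × Int) =>
          let g : Int := |ab.1 - ab.2|
          if g ≥ s.1 then (g, s.2.2, s.2.2 + 1) else (s.1, s.2.1, s.2.2 + 1))
        (-1, 0, 0)
        = (pvGaps data).foldl
            (fun (s : Int × Int × Int) gg =>
              if gg ≥ s.1 then (gg, s.2.2, s.2.2 + 1) else (s.1, s.2.1, s.2.2 + 1))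
            (-1, 0, 0) := by
      simp only [pvGaps, List.foldl_map]
    rw [hB, pvBfold_char, href]
    dsimp only
    rw [if_pos (by omega : m ≥ -1)]
    simp
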